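-- pv_equiv track=rewrite | github.com/EricMeteorite/Recall-ai | recall/index/ngram_index.py | _scan_chunk
-- ===== SOURCE A (Python) =====
-- from typing import List, Dict, Set, Optional, Tuple
--
-- def _scan_chunk(
--
--     query_lower: str,
--     search_terms: List[str],
--     chunk: List[Tuple[str, str]]
-- ) -> List[str]:
--     """扫描单个分片（用于并行搜索）"""
--     results = []
--
--     for memory_id, content in chunk:
--         content_lower = content.lower()
--
--         # 直接子串匹配
--         if query_lower in content_lower:
--             results.append(memory_id)
--             continue
--
--         # 检查关键子串
--         for term in search_terms:
--             if term in content_lower: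
--                 results.append(memory_id)
--                 break
--
--     return results
-- ===== SOURCE B (Python) =====
-- from typing import List, Tuple
--
--
-- def _scan_chunk(
--     query_lower: str,
--     search_terms: List[str],
--     chunk: List[Tuple[str, str]]
-- ) -> List[str]:
--     """Pattern-major scan: lower each content once, then OR each pattern's
--     match vector into a flags vector; finally emit ids of flagged rows."""
--     lowered = [content.lower() for _, content in chunk]
--     flags = [False] * len(chunk)
--     for pattern in [query_lower] + search_terms:
--         flags = [f or (pattern in cl) for f, cl in zip(flags, lowered)]
--     return [mid for (mid, _), f in zip(chunk, flags) if f]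
-- ===== Notes on version B (the rewrite author's own statement) =====
-- stated objective: alternative
-- what changed: B inverts the loop nesting: instead of A's content-major scan with an early-exit inner loop over the terms, B does a pattern-major sweep that ORs each pattern's match vector into a boolean flags vector over the chunk (contents lowered once up front), then emits the ids of flagged rows in chunk order.
import Mathlib
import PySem

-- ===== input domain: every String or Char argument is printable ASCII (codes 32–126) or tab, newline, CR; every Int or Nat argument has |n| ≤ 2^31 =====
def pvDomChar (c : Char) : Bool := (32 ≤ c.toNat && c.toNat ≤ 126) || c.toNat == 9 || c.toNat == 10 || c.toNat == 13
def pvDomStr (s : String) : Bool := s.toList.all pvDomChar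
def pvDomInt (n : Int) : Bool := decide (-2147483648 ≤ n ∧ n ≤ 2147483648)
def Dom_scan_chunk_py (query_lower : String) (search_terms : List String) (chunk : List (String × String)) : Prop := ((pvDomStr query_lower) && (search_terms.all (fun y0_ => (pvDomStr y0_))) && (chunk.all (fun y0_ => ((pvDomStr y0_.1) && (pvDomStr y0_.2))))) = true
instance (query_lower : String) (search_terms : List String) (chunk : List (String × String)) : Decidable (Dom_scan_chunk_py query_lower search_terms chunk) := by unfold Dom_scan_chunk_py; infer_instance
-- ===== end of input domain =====

-- B inverts the loop nesting (pattern-major sweep ORing match vectors into a flags vector)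
-- instead of A's content-major scan with an early-exit term loop; same results, alternative structure.

-- ===== PORT A =====
-- inner 'for term in search_terms: if term in content_lower: … break' — true iff some term hits
def scanTermsA (search_terms : List String) (content_lower : String) : Bool :=
  match search_terms with
  | [] => false
  | t :: rest =>
    if PySem.Str.isIn t content_lower then true else scanTermsA rest content_lower

def scan_chunk_py (query_lower : String) (search_terms : List String) (chunk : List (String × String)) : List String :=
  chunk.foldl (fun results mc =>
    let content_lower := PySem.Str.lower mc.2
    if PySem.Str.isIn query_lower content_lower then results ++ [mc.1]
    else if scanTermsA search_terms content_lower then results ++ [mc.1]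
    else results) []

-- ===== PORT B =====
def scan_chunk_py_alt (query_lower : String) (search_terms : List String) (chunk : List (String × String)) : List String :=
  let lowered := chunk.map (fun mc => PySem.Str.lower mc.2)
  let flags := (query_lower :: search_terms).foldl
    (fun fl pattern => List.zipWith (fun f cl => f || PySem.Str.isIn pattern cl) fl lowered)
    (List.replicate chunk.length false)
  ((chunk.zip flags).filter (fun x => x.2)).map (fun x => x.1.1)

-- ===== PRECONDITION & SPEC =====
def Spec_scan_chunk_py (query_lower : String) (search_terms : List String) (chunk : List (String × String)) (out : List String) : Prop := out = scan_chunk_py_alt query_lower search_terms chunk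
instance (query_lower : String) (search_terms : List String) (chunk : List (String × String)) (out : List String) : Decidable (Spec_scan_chunk_py query_lower search_terms chunk out) := by unfold Spec_scan_chunk_py; infer_instance

-- ===== CLAIM (what is proved, stated in full; the proofs are below) =====
def Claim_equal_scan_chunk_py : Prop := ∀ (query_lower : String) (search_terms : List String) (chunk : List (String × String)), Dom_scan_chunk_py query_lower search_terms chunk → Spec_scan_chunk_py query_lower search_terms chunk (scan_chunk_py query_lower search_terms chunk)

-- ===== LEMMAS AND PROOFS =====

theorem scanTermsA_eq_any (ts : List String) (cl : String) :
    scanTermsA ts cl = ts.any (fun t => PySem.Str.isIn t cl) := by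
  induction ts with
  | nil => rfl
  | cons t rest ih => cases h : PySem.Str.isIn t cl <;> simp [scanTermsA, h, ih] <;> simp_all

-- A in canonical form: filter by "some pattern in lowered content", then project ids
theorem scanA_canon (q : String) (ts : List String) (chunk : List (String × String)) :
    scan_chunk_py q ts chunk
      = (chunk.filter (fun mc => (q :: ts).any (fun p => PySem.Str.isIn p (PySem.Str.lower mc.2)))).map (fun mc => mc.1) := by
  unfold scan_chunk_py
  rw [PySem.List.foldl_congr_mem
    (g := fun results mc =>
      if (q :: ts).any (fun p => PySem.Str.isIn p (PySem.Str.lower mc.2)) then results ++ [mc.1] else results)]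
  · rw [PySem.List.foldl_append_if]; rfl
  · intro acc mc _
    dsimp only
    rw [List.any_cons, ← scanTermsA_eq_any]
    generalize PySem.Str.isIn q (PySem.Str.lower mc.2) = b1
    generalize scanTermsA ts (PySem.Str.lower mc.2) = b2
    cases b1 <;> cases b2 <;> simp

theorem zipWith_zipWith_right {α β : Type} (g h : α → β → α) (fl : List α) (low : List β) :
    List.zipWith g (List.zipWith h fl low) low
      = List.zipWith (fun f cl => g (h f cl) cl) fl low := by
  induction fl generalizing low with
  | nil => simp
  | cons f fl ih => cases low with
    | nil => simp
    | cons cl low => simp [ih]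

theorem zipWith_ext {α β γ : Type} (g h : α → β → γ) (H : ∀ a b, g a b = h a b)
    (l1 : List α) (l2 : List β) : List.zipWith g l1 l2 = List.zipWith h l1 l2 := by
  induction l1 generalizing l2 with
  | nil => simp
  | cons a l1 ih => cases l2 with
    | nil => simp
    | cons b l2 => simp [H, ih]

theorem zipWith_id_left {α β : Type} (fl : List α) (low : List β) (h : fl.length = low.length) :
    List.zipWith (fun f _ => f) fl low = fl := by
  induction fl generalizing low with
  | nil => simp
  | cons f fl ih => cases low with
    | nil => simp at h
    | cons cl low => simp_all

theorem flags_fold (ps : List String) (low : List String) (fl : List Bool)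
    (h : fl.length = low.length) :
    ps.foldl (fun fl p => List.zipWith (fun f cl => f || PySem.Str.isIn p cl) fl low) fl
      = List.zipWith (fun f cl => f || ps.any (fun p => PySem.Str.isIn p cl)) fl low := by
  induction ps generalizing fl with
  | nil =>
    simp only [List.foldl_nil, List.any_nil, Bool.or_false]
    exact (zipWith_id_left fl low h).symm
  | cons p rest ih =>
    rw [List.foldl_cons, ih _ (by simp [h]), zipWith_zipWith_right]
    exact zipWith_ext _ _ (fun a b => by simp [Bool.or_assoc]) fl low

theorem zipWith_replicate_false (n : Nat) (low : List String) (P : String → Bool)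
    (h : n = low.length) :
    List.zipWith (fun f cl => f || P cl) (List.replicate n false) low = low.map P := by
  subst h
  induction low with
  | nil => rfl
  | cons cl low ih => simp [List.replicate_succ, ih]

theorem zip_map_filter (chunk : List (String × String)) (P : String × String → Bool) :
    ((chunk.zip (chunk.map P)).filter (fun x => x.2)).map (fun x => x.1.1)
      = (chunk.filter P).map (fun mc => mc.1) := by
  induction chunk with
  | nil => rfl
  | cons mc chunk ih => by_cases h : P mc <;> simp [h, ih]

theorem scanB_canon (q : String) (ts : List String) (chunk : List (String × String)) :
    scan_chunk_py_alt q ts chunk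
      = (chunk.filter (fun mc => (q :: ts).any (fun p => PySem.Str.isIn p (PySem.Str.lower mc.2)))).map (fun mc => mc.1) := by
  simp only [scan_chunk_py_alt]
  rw [flags_fold _ _ _ (by simp), zipWith_replicate_false _ _ _ (by simp), List.map_map]
  exact zip_map_filter chunk _

-- ===== VERDICT (by name: the statement is the Claim_ definition above) =====
theorem scan_chunk_py_spec : Claim_equal_scan_chunk_py := by
  intro q ts chunk _
  unfold Spec_scan_chunk_py
  rw [scanA_canon, scanB_canon]
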